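-- pv_equiv track=rewrite | github.com/PdxCodeGuild/Class_Runtime_Terrors | 1 Python/solutions/practice5-more_practice.py | make_pretty_helper
-- ===== SOURCE A (Python) =====
-- def make_pretty_helper(input):
--     output = input
--     if len(output) < 4:
--         return output
--     output = [char for char in output]
--     decrementer = len(output) - 3
--     while decrementer >= 0:             #01234567
--         output.insert(decrementer, ',') #1000000
--         decrementer -= 3                #1000,000
--     return ''.join(output)
-- ===== SOURCE B (Python) =====
-- def make_pretty_helper(input):
--     if len(input) < 4:
--         return input
--     return make_pretty_helper(input[:-3]) + ',' + input[-3:]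
-- ===== Notes on version B (the rewrite author's own statement) =====
-- stated objective: simpler
-- what changed: Replaces the char-list explosion and the in-place insert loop over a decreasing index with a three-line recursion that peels the last three characters and joins with a comma.
-- intended difference: On inputs of length >= 4 whose length is a multiple of 3, A's loop also inserts a comma at index 0 and returns the grouping with a spurious leading comma, while B returns the grouping without it, which is the intended thousands formatting. — e.g. on make_pretty_helper("123456"): A returns ",123,456", B returns "123,456"
import Mathlib
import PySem

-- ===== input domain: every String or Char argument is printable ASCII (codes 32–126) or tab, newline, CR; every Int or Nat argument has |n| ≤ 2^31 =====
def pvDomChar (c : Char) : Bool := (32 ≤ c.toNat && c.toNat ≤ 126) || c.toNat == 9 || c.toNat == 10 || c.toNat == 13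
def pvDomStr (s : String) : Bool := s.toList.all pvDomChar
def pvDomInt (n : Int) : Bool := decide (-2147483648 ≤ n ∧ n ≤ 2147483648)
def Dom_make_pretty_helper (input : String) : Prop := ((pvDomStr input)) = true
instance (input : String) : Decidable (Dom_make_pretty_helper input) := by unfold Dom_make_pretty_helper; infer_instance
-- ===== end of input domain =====

-- B replaces A's char-list + in-place insert loop by a recursion peeling the last three
-- characters (simpler); on lengths ≥ 4 divisible by 3 A returns a spurious leading comma, B does not (see D_).

-- ===== PORT A =====
-- the while loop: 'while decrementer >= 0: output.insert(decrementer, ','); decrementer -= 3'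
def mphLoop (output : List Char) (decrementer : Int) : List Char :=
  if _h : 0 ≤ decrementer then
    mphLoop (PySem.List.insert output decrementer ',') (decrementer - 3)
  else output
termination_by (decrementer + 3).toNat
decreasing_by omega

-- output = input; if len(output) < 4: return output; output = [char for char in output];
-- decrementer = len(output) - 3; <loop>; return ''.join(output)
def make_pretty_helper (input : String) : String :=
  if PySem.Str.len input < 4 then input
  else String.ofList (mphLoop input.toList ((input.toList.length : Int) - 3))

-- ===== PORT B =====
def make_pretty_helper_alt (input : String) : String :=
  if _h : PySem.Str.len input < 4 then input
  else
    -- make_pretty_helper(input[:-3]) + ',' + input[-3:]  (string concatenation on code points)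
    String.ofList ((make_pretty_helper_alt (PySem.Str.slice input none (some (-3)))).toList
      ++ ',' :: (PySem.Str.slice input (some (-3)) none).toList)
termination_by input.toList.length
decreasing_by
  simp only [PySem.Str.toList_slice, PySem.Chars.slice_eq_listSlice,
    PySem.List.slice_to_neg_ofNat input.toList 3 (by omega), List.length_take]
  simp only [PySem.Str.len_eq, not_lt] at _h
  omega

-- ===== PRECONDITION & SPEC =====
-- On inputs of length ≥ 4 whose length is a multiple of 3, A's loop also inserts a comma at
-- index 0 and returns the grouping with a spurious leading comma; B returns the grouping
-- without it, which is the intended thousands formatting.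
def D_make_pretty_helper (input : String) : Prop :=
  4 ≤ PySem.Str.len input ∧ PySem.Int.mod (PySem.Str.len input) 3 = 0
instance (input : String) : Decidable (D_make_pretty_helper input) := by
  unfold D_make_pretty_helper; infer_instance

def Spec_make_pretty_helper (input : String) (out : String) : Prop :=
  ¬ D_make_pretty_helper input → out = make_pretty_helper_alt input
instance (input : String) (out : String) : Decidable (Spec_make_pretty_helper input out) := by
  unfold Spec_make_pretty_helper; infer_instance

def pvDiffWitness_make_pretty_helper : String := "123456"
def pvDiffWitnessOut_make_pretty_helper : String × String := (",123,456", "123,456")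

-- ===== CLAIM (what is proved, stated in full; the proofs are below) =====
def Claim_unchanged_make_pretty_helper : Prop := ∀ (input : String), Dom_make_pretty_helper input → Spec_make_pretty_helper input (make_pretty_helper input)
def Claim_changed_make_pretty_helper : Prop := Dom_make_pretty_helper (pvDiffWitness_make_pretty_helper) ∧ D_make_pretty_helper (pvDiffWitness_make_pretty_helper) ∧ make_pretty_helper (pvDiffWitness_make_pretty_helper) = pvDiffWitnessOut_make_pretty_helper.1 ∧ make_pretty_helper_alt (pvDiffWitness_make_pretty_helper) = pvDiffWitnessOut_make_pretty_helper.2 ∧ pvDiffWitnessOut_make_pretty_helper.1 ≠ pvDiffWitnessOut_make_pretty_helper.2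
def Claim_exact_make_pretty_helper : Prop := ∀ (input : String), Dom_make_pretty_helper input → D_make_pretty_helper input → make_pretty_helper input ≠ make_pretty_helper_alt input

-- ===== LEMMAS AND PROOFS =====

theorem mphLoop_neg {d : Int} (h : ¬ 0 ≤ d) (xs : List Char) : mphLoop xs d = xs := by
  rw [mphLoop]; simp [h]

-- insertions at indices ≤ ys.length never touch an appended tail
theorem mphLoop_append (k : Nat) :
    ∀ (d : Int) (ys zs : List Char), (d + 3).toNat ≤ k → d ≤ (ys.length : Int) →
      mphLoop (ys ++ zs) d = mphLoop ys d ++ zs := by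
  induction k with
  | zero =>
    intro d ys zs hk hd
    have h0 : ¬ 0 ≤ d := by omega
    rw [mphLoop_neg h0, mphLoop_neg h0]
  | succ k ih =>
    intro d ys zs hk hd
    by_cases h0 : 0 ≤ d
    · conv_lhs => rw [mphLoop]
      conv_rhs => rw [mphLoop]
      simp only [h0, dif_pos]
      obtain ⟨p, rfl⟩ : ∃ p : Nat, d = (p : Int) := ⟨d.toNat, by omega⟩
      have hp : p ≤ ys.length := by exact_mod_cast hd
      rw [PySem.List.insert_natCast (ys ++ zs) p ',' (by simp; omega),
          PySem.List.insert_natCast ys p ',' hp]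
      rw [List.take_append_of_le_length hp, List.drop_append_of_le_length hp]
      rw [show List.take p ys ++ ',' :: (List.drop p ys ++ zs)
            = (List.take p ys ++ ',' :: List.drop p ys) ++ zs by simp]
      exact ih _ _ _ (by omega) (by simp; omega)
    · rw [mphLoop_neg h0, mphLoop_neg h0]

set_option maxHeartbeats 1000000 in
-- the core characterisation: A's loop result vs B's recursion, on the code-point lists
theorem mphLoop_eq_alt (n : Nat) :
    ∀ (s : String), s.toList.length = n → 1 ≤ n →
      mphLoop s.toList ((n : Int) - 3)
        = if n % 3 = 0 then ',' :: (make_pretty_helper_alt s).toList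
          else (make_pretty_helper_alt s).toList := by
  induction n using Nat.strong_induction_on with
  | _ n ih =>
    intro s hlen hpos
    have hlen' : s.length = n := by rw [← hlen]; simp
    by_cases hsmall : n < 4
    · -- B returns the input unchanged
      have halt : make_pretty_helper_alt s = s := by
        rw [make_pretty_helper_alt]
        simp [PySem.Str.len_eq, hlen, hsmall]
      rw [halt]
      interval_cases n
      · -- n = 1 : the loop body never runs
        rw [mphLoop_neg (by omega)]; norm_num
      · rw [mphLoop_neg (by omega)]; norm_num
      · -- n = 3 : one insertion, at index 0
        rw [mphLoop]
        norm_num [PySem.List.insert_zero]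
        rw [mphLoop_neg (by omega)]
    · -- n ≥ 4 : one loop iteration = one recursion step of B
      obtain ⟨m, hm3, hmcast⟩ : ∃ m : Nat, n = m + 3 ∧ ((n : Int) - 3) = (m : Int) :=
        ⟨n - 3, by omega, by omega⟩
      rw [mphLoop]
      simp only [hmcast, dif_pos (by omega : (0:Int) ≤ (m : Int))]
      rw [PySem.List.insert_natCast s.toList m ',' (by omega)]
      rw [mphLoop_append (n + 1) ((m : Int) - 3)
        (s.toList.take m) (',' :: s.toList.drop m) (by omega)
        (by simp; omega)]
      -- the prefix is exactly the string B recurses on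
      set t : String := PySem.Str.slice s none (some (-3)) with ht
      have htl : t.toList = s.toList.take m := by
        rw [ht, PySem.Str.toList_slice, PySem.Chars.slice_eq_listSlice,
            PySem.List.slice_to_neg_ofNat s.toList 3 (by omega), hlen]
        congr 1; omega
      have htlen : t.toList.length = m := by simp [htl]; omega
      rw [← htl, ih m (by omega) t htlen (by omega)]
      -- unfold B once on s
      have halt : (make_pretty_helper_alt s).toList
          = (make_pretty_helper_alt t).toList ++ ',' :: s.toList.drop m := by
        rw [make_pretty_helper_alt]
        have h4 : ¬ PySem.Str.len s < 4 := by
          rw [PySem.Str.len_eq, hlen]; exact_mod_cast (by omega : ¬ (n : Int) < 4)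
        simp only [h4, dif_neg, not_false_iff]
        have hdrop : (PySem.Str.slice s (some (-3)) none).toList = s.toList.drop m := by
          rw [PySem.Str.toList_slice, PySem.Chars.slice_eq_listSlice,
              PySem.List.slice_from_neg_ofNat s.toList 3 (by omega), hlen]
          congr 1; omega
        rw [String.toList_ofList, hdrop, ← ht]
      have hmod : m % 3 = n % 3 := by omega
      rw [halt, hmod]
      by_cases h3 : n % 3 = 0 <;> simp [h3]

theorem A_eq_of_ge4 (s : String) (h : ¬ s.toList.length < 4) :
    make_pretty_helper s
      = String.ofList (if s.toList.length % 3 = 0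
          then ',' :: (make_pretty_helper_alt s).toList
          else (make_pretty_helper_alt s).toList) := by
  rw [make_pretty_helper]
  have h' : ¬ PySem.Str.len s < 4 := by
    rw [PySem.Str.len_eq]; exact_mod_cast h
  simp only [h', if_neg, not_false_iff]
  rw [mphLoop_eq_alt s.toList.length s rfl (by omega)]

theorem D_iff (s : String) :
    D_make_pretty_helper s ↔ 4 ≤ s.toList.length ∧ s.toList.length % 3 = 0 := by
  unfold D_make_pretty_helper
  rw [PySem.Str.len_eq, PySem.Int.mod_eq_zero_iff_dvd]
  constructor
  · rintro ⟨h1, h2⟩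
    have h1' : 4 ≤ s.toList.length := by exact_mod_cast h1
    have h2' : 3 ∣ s.toList.length := by exact_mod_cast h2
    exact ⟨h1', by omega⟩
  · rintro ⟨h1, h2⟩
    have h2' : 3 ∣ s.toList.length := by omega
    exact ⟨by exact_mod_cast h1, by exact_mod_cast h2'⟩

-- ===== VERDICT (by name: the statement is the Claim_ definition above) =====
theorem make_pretty_helper_spec : Claim_unchanged_make_pretty_helper := by
  intro s _ hD
  by_cases hsmall : s.toList.length < 4
  · -- both return the input unchanged
    have h' : PySem.Str.len s < 4 := by rw [PySem.Str.len_eq]; exact_mod_cast hsmall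
    rw [make_pretty_helper, make_pretty_helper_alt]
    simp only [h', if_pos, dif_pos]
  · have hmod : ¬ s.toList.length % 3 = 0 := fun hm =>
      hD ((D_iff s).mpr ⟨by omega, hm⟩)
    rw [A_eq_of_ge4 s hsmall, if_neg hmod, String.ofList_toList]

theorem make_pretty_helper_changed : Claim_changed_make_pretty_helper := by
  unfold Claim_changed_make_pretty_helper
  refine ⟨by decide, by decide, ?_, ?_, by decide⟩
  · show make_pretty_helper "123456" = ",123,456"
    rw [make_pretty_helper]
    rw [if_neg (by decide)]
    rw [show ("123456" : String).toList = ['1','2','3','4','5','6'] from by decide]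
    rw [show (((['1','2','3','4','5','6'] : List Char).length : Int) - 3) = ((3:Nat) : Int) from by decide]
    rw [mphLoop, dif_pos (by decide), PySem.List.insert_natCast _ 3 ',' (by decide)]
    norm_num
    rw [mphLoop, dif_pos (by decide), PySem.List.insert_zero, mphLoop_neg (by decide)]
  · show make_pretty_helper_alt "123456" = "123,456"
    conv_lhs => rw [make_pretty_helper_alt]
    rw [dif_neg (by decide)]
    rw [show PySem.Str.slice "123456" none (some (-3)) = "123" from by decide]
    rw [show make_pretty_helper_alt "123" = "123" from by
      rw [make_pretty_helper_alt]; rw [dif_pos (by decide)]]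
    decide

theorem make_pretty_helper_tight : Claim_exact_make_pretty_helper := by
  intro s _ hD heq
  obtain ⟨h4, hm⟩ := (D_iff s).mp hD
  have := congrArg String.toList heq
  rw [A_eq_of_ge4 s (by omega), if_pos hm, String.toList_ofList] at this
  have hlen := congrArg List.length this
  simp at hlen
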